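-- pv_equiv track=rewrite | github.com/bulbulator228/prigramirovanie | maxOlenKonskayaZalupa/vyz/день 19.py | rectangles_with_area
-- ===== SOURCE A (Python) =====
-- def rectangles_with_area(s, counted=True):
--     results = []
--     for width in range(1, s + 1):
--         if s % width == 0:
--             height = s // width
--             if counted or width <= height:
--                 results.append((width, height))
--     return results
-- ===== SOURCE B (Python) =====
-- def rectangles_with_area(s, counted=True):
--     small = []
--     big = []
--     d = 1
--     while d * d <= s:
--         if s % d == 0:
--             q = s // d
--             small.append((d, q))
--             if d != q:
--                 big.append((q, d))
--         d += 1
--     return small + big[::-1] if counted else small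
-- ===== Notes on version B (the rewrite author's own statement) =====
-- stated objective: faster
-- what changed: Instead of testing every width from 1 to s, B trial-divides only up to sqrt(s), pairing each small divisor d with its cofactor s//d, and emits small widths followed by the reversed cofactor list to keep ascending width order.
import Mathlib
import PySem

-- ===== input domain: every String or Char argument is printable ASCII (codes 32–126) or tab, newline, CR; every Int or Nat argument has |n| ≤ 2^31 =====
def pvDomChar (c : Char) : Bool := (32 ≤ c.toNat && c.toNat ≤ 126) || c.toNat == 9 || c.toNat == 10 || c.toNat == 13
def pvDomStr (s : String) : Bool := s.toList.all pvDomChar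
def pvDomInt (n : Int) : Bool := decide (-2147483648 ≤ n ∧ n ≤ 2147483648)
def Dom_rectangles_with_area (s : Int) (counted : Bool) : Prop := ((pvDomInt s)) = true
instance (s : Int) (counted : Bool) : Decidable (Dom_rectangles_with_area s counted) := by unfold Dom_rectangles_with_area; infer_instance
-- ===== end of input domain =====

-- B replaces A's full scan of widths 1..s by trial division up to sqrt(s) (each divisor paired
-- with its cofactor, cofactors emitted in reverse), an asymptotically faster algorithm.


-- ===== PORT A =====
def rectangles_with_area (s : Int) (counted : Bool) : List (Int × Int) :=
  (PySem.List.pyRange 1 (s + 1) 1).foldl (fun results width =>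
    if PySem.Int.mod s width == 0 then
      let height := PySem.Int.floordiv s width
      if counted || decide (width ≤ height) then results ++ [(width, height)]
      else results
    else results) []

-- ===== PORT B =====
-- the `while d * d <= s` loop of Source B, carrying the accumulators `small` and `big`
-- (structural recursion on a fuel bound for the loop counter; the fuel only makes it total)
def pvAltGo (fuel : Nat) (s d : Int) (small big : List (Int × Int)) : List (Int × Int) × List (Int × Int) :=
  match fuel with
  | 0 => (small, big)
  | fuel + 1 =>
    if d * d ≤ s then
      if PySem.Int.mod s d == 0 then
        let q := PySem.Int.floordiv s d
        pvAltGo fuel s (d + 1) (small ++ [(d, q)]) (if d != q then big ++ [(q, d)] else big)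
      else pvAltGo fuel s (d + 1) small big
    else (small, big)

def pvAltLoop (s d : Int) (small big : List (Int × Int)) : List (Int × Int) × List (Int × Int) :=
  pvAltGo (s + 1 - d).toNat s d small big

def rectangles_with_area_alt (s : Int) (counted : Bool) : List (Int × Int) :=
  let p := pvAltLoop s 1 [] []
  -- big[::-1] is List.reverse (PySem.List.slice?_none_none_neg_one)
  if counted then p.1 ++ p.2.reverse else p.1

-- ===== PRECONDITION & SPEC =====
def Spec_rectangles_with_area (s : Int) (counted : Bool) (out : List (Int × Int)) : Prop := out = rectangles_with_area_alt s counted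
instance (s : Int) (counted : Bool) (out : List (Int × Int)) : Decidable (Spec_rectangles_with_area s counted out) := by unfold Spec_rectangles_with_area; infer_instance

-- ===== CLAIM (what is proved, stated in full; the proofs are below) =====
def Claim_equal_rectangles_with_area : Prop := ∀ (s : Int) (counted : Bool), Dom_rectangles_with_area s counted → Spec_rectangles_with_area s counted (rectangles_with_area s counted)

-- ===== LEMMAS AND PROOFS =====

-- integer square root of s, as an Int
def pvMsq (s : Int) : Int := ((Nat.sqrt s.toNat : Nat) : Int)

lemma pvMsq_iff (s e : Int) (hs : 0 ≤ s) (he : 0 ≤ e) : e ≤ pvMsq s ↔ e * e ≤ s := by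
  unfold pvMsq
  have h := Nat.le_sqrt' (m := e.toNat) (n := s.toNat)
  have he' : (e.toNat : Int) = e := by omega
  have hs' : (s.toNat : Int) = s := by omega
  constructor
  · intro hle
    have h1 : e.toNat ^ 2 ≤ s.toNat := h.mp (by omega)
    have h2 : (e.toNat : Int) * e.toNat ≤ (s.toNat : Int) := by
      exact_mod_cast (by simpa [pow_two] using h1 : e.toNat * e.toNat ≤ s.toNat)
    rw [he', hs'] at h2; exact h2
  · intro hle
    have h2 : (e.toNat : Int) * e.toNat ≤ (s.toNat : Int) := by rw [he', hs']; exact hle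
    have h1 : e.toNat * e.toNat ≤ s.toNat := by exact_mod_cast h2
    have := h.mpr (by simpa [pow_two] using h1)
    omega

lemma pvMsq_le_self (s : Int) (hs : 1 ≤ s) : pvMsq s ≤ s := by
  unfold pvMsq
  have := Nat.sqrt_le_self s.toNat
  omega

lemma pvMsq_nonneg (s : Int) : 0 ≤ pvMsq s := by unfold pvMsq; positivity

-- closed form of the B loop
lemma pvAltGo_eq (s : Int) (hs : 1 ≤ s) : ∀ fuel (d : Int) small big, 1 ≤ d → (s + 1 - d).toNat ≤ fuel →
    pvAltGo fuel s d small big =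
      (small ++ ((PySem.List.pyRange d (pvMsq s + 1) 1).filter
          (fun e => PySem.Int.mod s e == 0)).map (fun e => (e, PySem.Int.floordiv s e)),
       big ++ ((PySem.List.pyRange d (pvMsq s + 1) 1).filter
          (fun e => PySem.Int.mod s e == 0 && e != PySem.Int.floordiv s e)).map
          (fun e => (PySem.Int.floordiv s e, e))) := by
  intro fuel
  induction fuel with
  | zero =>
    intro d small big hd hf
    have hdm : pvMsq s + 1 ≤ d := by
      have := pvMsq_le_self s hs
      omega
    rw [PySem.List.pyRange_one_eq_nil hdm]
    simp [pvAltGo]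
  | succ fuel ih =>
    intro d small big hd hf
    rw [pvAltGo]
    by_cases h1 : d * d ≤ s
    · have hdm : d ≤ pvMsq s := (pvMsq_iff s d (by omega) (by omega)).mpr h1
      have hdd : d ≤ d * d := by nlinarith [mul_self_nonneg d, mul_self_nonneg (d - 1)]
      rw [if_pos h1, PySem.List.pyRange_one_cons (by omega : d < pvMsq s + 1),
        List.filter_cons, List.filter_cons]
      by_cases h2 : (PySem.Int.mod s d == 0) = true
      · rw [if_pos h2, ih (d + 1) _ _ (by omega) (by omega)]
        by_cases hq : (d != PySem.Int.floordiv s d) = true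
        · simp [h2, hq]
        · simp [h2, hq]
      · rw [if_neg h2, ih (d + 1) _ _ (by omega) (by omega)]
        simp [h2]
    · have hdm : pvMsq s + 1 ≤ d := by
        by_cases h : pvMsq s + 1 ≤ d
        · exact h
        · exact absurd ((pvMsq_iff s d (by omega) (by omega)).mp (by omega)) h1
      rw [if_neg h1, PySem.List.pyRange_one_eq_nil hdm]
      simp

lemma pvAltLoop_eq (s : Int) (hs : 1 ≤ s) : ∀ d small big, 1 ≤ d →
    pvAltLoop s d small big =
      (small ++ ((PySem.List.pyRange d (pvMsq s + 1) 1).filter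
          (fun e => PySem.Int.mod s e == 0)).map (fun e => (e, PySem.Int.floordiv s e)),
       big ++ ((PySem.List.pyRange d (pvMsq s + 1) 1).filter
          (fun e => PySem.Int.mod s e == 0 && e != PySem.Int.floordiv s e)).map
          (fun e => (PySem.Int.floordiv s e, e))) := by
  intro d small big hd
  exact pvAltGo_eq s hs _ d small big hd le_rfl

-- A as a filter+map over the range
lemma rectangles_with_area_eq (s : Int) (counted : Bool) :
    rectangles_with_area s counted =
      ((PySem.List.pyRange 1 (s + 1) 1).filter
        (fun w => PySem.Int.mod s w == 0 && (counted || decide (w ≤ PySem.Int.floordiv s w)))).map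
        (fun w => (w, PySem.Int.floordiv s w)) := by
  unfold rectangles_with_area
  rw [show (fun (results : List (Int × Int)) width =>
      if PySem.Int.mod s width == 0 then
        let height := PySem.Int.floordiv s width
        if counted || decide (width ≤ height) then results ++ [(width, height)]
        else results
      else results) =
      (fun acc w =>
        if (PySem.Int.mod s w == 0 && (counted || decide (w ≤ PySem.Int.floordiv s w))) then
          acc ++ [(w, PySem.Int.floordiv s w)] else acc) by
    funext acc w; by_cases h1 : PySem.Int.mod s w == 0 <;>
      by_cases h2 : counted || decide (w ≤ PySem.Int.floordiv s w) <;> simp [h1, h2]]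
  rw [PySem.List.foldl_append_if]
  simp

-- the cofactor of a positive divisor: its basic facts
lemma pvCof (s w : Int) (hs : 1 ≤ s) (hw : 1 ≤ w) (hdvd : w ∣ s) :
    1 ≤ PySem.Int.floordiv s w ∧ PySem.Int.floordiv s w * w = s ∧
    PySem.Int.floordiv s w ∣ s ∧ PySem.Int.floordiv s (PySem.Int.floordiv s w) = w := by
  obtain ⟨c, hc⟩ := hdvd
  have hw0 : 0 < w := by omega
  have hq : PySem.Int.floordiv s w = c := by
    rw [PySem.Int.floordiv_eq_ediv_of_pos hw0, hc, Int.mul_ediv_cancel_left _ (by omega)]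
  have hc1 : 1 ≤ c := by nlinarith
  refine ⟨by omega, by rw [hq]; linarith [hc.symm], ⟨w, by rw [hq]; linarith [hc.symm]⟩, ?_⟩
  rw [hq, PySem.Int.floordiv_eq_ediv_of_pos (by omega : (0:Int) < c), hc, mul_comm,
    Int.mul_ediv_cancel_left _ (by omega)]

-- membership bijection between all divisors of s and the two sqrt-bounded lists
lemma pvMemEquiv (s : Int) (hs : 1 ≤ s) (x : Int × Int) :
    (∃ w, (1 ≤ w ∧ w < s + 1) ∧ w ∣ s ∧ x = (w, PySem.Int.floordiv s w)) ↔
    ((∃ e, (1 ≤ e ∧ e < pvMsq s + 1) ∧ e ∣ s ∧ x = (e, PySem.Int.floordiv s e)) ∨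
     (∃ e, (1 ≤ e ∧ e < pvMsq s + 1) ∧ (e ∣ s ∧ e ≠ PySem.Int.floordiv s e) ∧
       x = (PySem.Int.floordiv s e, e))) := by
  constructor
  · rintro ⟨w, ⟨hw1, _⟩, hdvd, hx⟩
    by_cases hsm : w ≤ pvMsq s
    · exact Or.inl ⟨w, ⟨hw1, by omega⟩, hdvd, hx⟩
    · obtain ⟨hq1, hqw, hqdvd, hqq⟩ := pvCof s w hs hw1 hdvd
      set q := PySem.Int.floordiv s w with hqdef
      have hwws : ¬ (w * w ≤ s) := fun h => hsm ((pvMsq_iff s w (by omega) (by omega)).mpr h)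
      have hqltw : q < w := by nlinarith
      refine Or.inr ⟨q, ⟨by omega, ?_⟩, ⟨hqdvd, by omega⟩, by rw [hx, hqq]⟩
      have hqs : q * q ≤ s := by nlinarith
      have := (pvMsq_iff s q (by omega) (by omega)).mpr hqs
      omega
  · rintro (⟨e, ⟨he1, _⟩, hdvd, hx⟩ | ⟨e, ⟨he1, _⟩, ⟨hdvd, _⟩, hx⟩)
    · exact ⟨e, ⟨he1, by have := Int.le_of_dvd (by omega) hdvd; omega⟩, hdvd, hx⟩
    · obtain ⟨hq1, hqw, hqdvd, hqq⟩ := pvCof s e hs he1 hdvd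
      exact ⟨PySem.Int.floordiv s e,
        ⟨by omega, by have := Int.le_of_dvd (by omega) hqdvd; omega⟩, hqdvd, by rw [hx, hqq]⟩

-- two lists strictly increasing in first component with the same members are equal
lemma pvEqOfMem : ∀ (l₁ l₂ : List (Int × Int)),
    l₁.Pairwise (fun a b => a.1 < b.1) → l₂.Pairwise (fun a b => a.1 < b.1) →
    (∀ x, x ∈ l₁ ↔ x ∈ l₂) → l₁ = l₂ := by
  intro l₁
  induction l₁ with
  | nil =>
    intro l₂ _ _ hm
    cases l₂ with
    | nil => rfl
    | cons y t => exact absurd ((hm y).mpr (by simp)) (by simp)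
  | cons x t ih =>
    intro l₂ h₁ h₂ hm
    cases l₂ with
    | nil => exact absurd ((hm x).mp (by simp)) (by simp)
    | cons y t₂ =>
      have hxy : x = y := by
        rcases List.mem_cons.mp ((hm x).mp (by simp)) with h | hx
        · exact h
        rcases List.mem_cons.mp ((hm y).mpr (by simp)) with h | hy
        · exact h.symm
        have hlt1 := (List.pairwise_cons.mp h₁).1 y hy
        have hlt2 := (List.pairwise_cons.mp h₂).1 x hx
        omega
      subst hxy
      congr 1
      apply ih t₂ (List.pairwise_cons.mp h₁).2 (List.pairwise_cons.mp h₂).2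
      intro z
      constructor
      · intro hz
        rcases List.mem_cons.mp ((hm z).mp (List.mem_cons_of_mem _ hz)) with h | h
        · have hlt := (List.pairwise_cons.mp h₁).1 z hz
          rw [h] at hlt
          exact absurd hlt (lt_irrefl _)
        · exact h
      · intro hz
        rcases List.mem_cons.mp ((hm z).mpr (List.mem_cons_of_mem _ hz)) with h | h
        · have hlt := (List.pairwise_cons.mp h₂).1 z hz
          rw [h] at hlt
          exact absurd hlt (lt_irrefl _)
        · exact h

theorem pv_main (s : Int) (counted : Bool) :
    rectangles_with_area s counted = rectangles_with_area_alt s counted := by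
  by_cases hs : 1 ≤ s
  case neg =>
    unfold rectangles_with_area rectangles_with_area_alt pvAltLoop
    rw [PySem.List.pyRange_one_eq_nil (by omega)]
    have h0 : (s + 1 - 1).toNat = 0 := by omega
    rw [h0]
    simp [pvAltGo]
  case pos =>
    have hm0 := pvMsq_nonneg s
    have hmle := pvMsq_le_self s hs
    rw [rectangles_with_area_eq]
    unfold rectangles_with_area_alt
    rw [pvAltLoop_eq s hs 1 [] [] le_rfl]
    have hdvd_of : ∀ w : Int, (PySem.Int.mod s w == 0) = true → w ∣ s := by
      intro w hw
      exact (PySem.Int.mod_eq_zero_iff_dvd s w).mp (by simpa using hw)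
    cases counted with
    | false =>
      simp only [Bool.false_eq_true, if_false, Bool.false_or, List.nil_append]
      rw [PySem.List.pyRange_one_append 1 (pvMsq s + 1) (s + 1) (by omega) (by omega),
        List.filter_append]
      have hnil : (PySem.List.pyRange (pvMsq s + 1) (s + 1) 1).filter
          (fun w => PySem.Int.mod s w == 0 && decide (w ≤ PySem.Int.floordiv s w)) = [] := by
        rw [List.filter_eq_nil_iff]
        intro w hw
        rw [PySem.List.mem_pyRange_one] at hw
        by_cases hdv : (PySem.Int.mod s w == 0) = true
        · obtain ⟨hq1, hqw, _, _⟩ := pvCof s w hs (by omega) (hdvd_of w hdv)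
          have hww : ¬ (w * w ≤ s) := fun hcon => by
            have := (pvMsq_iff s w (by omega) (by omega)).mpr hcon
            omega
          have hnle : ¬ (w ≤ PySem.Int.floordiv s w) := by
            intro hle
            nlinarith
          simp [hdv, hnle]
        · simp [hdv]
      have hcong : (PySem.List.pyRange 1 (pvMsq s + 1) 1).filter
            (fun w => PySem.Int.mod s w == 0 && decide (w ≤ PySem.Int.floordiv s w)) =
          (PySem.List.pyRange 1 (pvMsq s + 1) 1).filter (fun e => PySem.Int.mod s e == 0) := by
        apply List.filter_congr
        intro w hw
        rw [PySem.List.mem_pyRange_one] at hw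
        by_cases hdv : (PySem.Int.mod s w == 0) = true
        · obtain ⟨hq1, hqw, _, _⟩ := pvCof s w hs (by omega) (hdvd_of w hdv)
          have hww : w * w ≤ s := (pvMsq_iff s w (by omega) (by omega)).mp (by omega)
          have hle : w ≤ PySem.Int.floordiv s w := by nlinarith
          simp [hdv, hle]
        · simp [hdv]
      rw [hnil, hcong, List.append_nil]
    | true =>
      simp only [if_true, Bool.true_or, Bool.and_true, List.nil_append]
      apply pvEqOfMem
      · rw [List.pairwise_map]
        exact (PySem.List.pairwise_lt_pyRange_one _ _).filter _
      · rw [List.pairwise_append]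
        refine ⟨?_, ?_, ?_⟩
        · rw [List.pairwise_map]
          exact (PySem.List.pairwise_lt_pyRange_one _ _).filter _
        · rw [List.pairwise_reverse, List.pairwise_map]
          have hpw : (List.filter (fun e => PySem.Int.mod s e == 0 && e != PySem.Int.floordiv s e)
              (PySem.List.pyRange 1 (pvMsq s + 1) 1)).Pairwise (· < ·) :=
            (PySem.List.pairwise_lt_pyRange_one _ _).filter _
          apply List.Pairwise.imp_of_mem ?_ hpw
          intro e1 e2 he1 he2 hlt
          rw [List.mem_filter, PySem.List.mem_pyRange_one] at he1 he2
          obtain ⟨⟨he11, _⟩, hp1⟩ := he1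
          obtain ⟨⟨he21, _⟩, hp2⟩ := he2
          obtain ⟨ha1, ha2, _, _⟩ := pvCof s e1 hs (by omega) (hdvd_of e1 (by simpa using (Bool.and_eq_true_iff.mp hp1).1))
          obtain ⟨hb1, hb2, _, _⟩ := pvCof s e2 hs (by omega) (hdvd_of e2 (by simpa using (Bool.and_eq_true_iff.mp hp2).1))
          show PySem.Int.floordiv s e2 < PySem.Int.floordiv s e1
          nlinarith
        · intro x hx y hy
          rw [List.mem_map] at hx
          rw [List.mem_reverse, List.mem_map] at hy
          obtain ⟨e, he, hxe⟩ := hx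
          obtain ⟨e', he', hye⟩ := hy
          rw [List.mem_filter, PySem.List.mem_pyRange_one] at he he'
          obtain ⟨⟨he1, he2⟩, hp⟩ := he
          obtain ⟨⟨he1', he2'⟩, hp'⟩ := he'
          obtain ⟨hq1, hq2, _, _⟩ := pvCof s e' hs (by omega)
            (hdvd_of e' (by simpa using (Bool.and_eq_true_iff.mp hp').1))
          have hne : e' ≠ PySem.Int.floordiv s e' := by
            have := (Bool.and_eq_true_iff.mp hp').2
            simpa using this
          have hee : e' * e' ≤ s := (pvMsq_iff s e' (by omega) (by omega)).mp (by omega)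
          have hlt : e' < PySem.Int.floordiv s e' := by
            rcases lt_or_eq_of_le (by nlinarith : e' ≤ PySem.Int.floordiv s e') with h | h
            · exact h
            · exact absurd h hne
          have hbig : ¬ (PySem.Int.floordiv s e' ≤ pvMsq s) := by
            intro hcon
            have := (pvMsq_iff s (PySem.Int.floordiv s e') (by omega) (by omega)).mp hcon
            nlinarith
          rw [← hxe, ← hye]
          simp only []
          omega
      · intro x
        have hmm := pvMemEquiv s hs x
        constructor
        · intro hx
          rw [List.mem_map] at hx
          obtain ⟨w, hw, hxw⟩ := hx
          rw [List.mem_filter, PySem.List.mem_pyRange_one] at hw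
          rcases hmm.mp ⟨w, hw.1, hdvd_of w hw.2, hxw.symm⟩ with ⟨e, hb, hdv, hxe⟩ | ⟨e, hb, ⟨hdv, hne⟩, hxe⟩
          · apply List.mem_append_left
            rw [List.mem_map]
            exact ⟨e, by
              rw [List.mem_filter, PySem.List.mem_pyRange_one]
              exact ⟨hb, by simpa [PySem.Int.mod_eq_zero_iff_dvd] using hdv⟩, hxe.symm⟩
          · apply List.mem_append_right
            rw [List.mem_reverse, List.mem_map]
            refine ⟨e, ?_, hxe.symm⟩
            rw [List.mem_filter, PySem.List.mem_pyRange_one]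
            refine ⟨hb, ?_⟩
            rw [Bool.and_eq_true_iff]
            exact ⟨by simpa [PySem.Int.mod_eq_zero_iff_dvd] using hdv, by simpa using hne⟩
        · intro hx
          rcases List.mem_append.mp hx with hx | hx
          · rw [List.mem_map] at hx
            obtain ⟨e, he, hxe⟩ := hx
            rw [List.mem_filter, PySem.List.mem_pyRange_one] at he
            obtain ⟨w, hwb, hwdvd, hxw⟩ := hmm.mpr (Or.inl ⟨e, he.1, hdvd_of e he.2, hxe.symm⟩)
            rw [List.mem_map]
            exact ⟨w, by
              rw [List.mem_filter, PySem.List.mem_pyRange_one]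
              exact ⟨hwb, by simpa [PySem.Int.mod_eq_zero_iff_dvd] using hwdvd⟩, hxw.symm⟩
          · rw [List.mem_reverse, List.mem_map] at hx
            obtain ⟨e, he, hxe⟩ := hx
            rw [List.mem_filter, PySem.List.mem_pyRange_one] at he
            obtain ⟨⟨he1, he2⟩, hp⟩ := he
            have hdv := hdvd_of e (by simpa using (Bool.and_eq_true_iff.mp hp).1)
            have hne : e ≠ PySem.Int.floordiv s e := by
              have := (Bool.and_eq_true_iff.mp hp).2
              simpa using this
            obtain ⟨w, hwb, hwdvd, hxw⟩ := hmm.mpr (Or.inr ⟨e, ⟨he1, he2⟩, ⟨hdv, hne⟩, hxe.symm⟩)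
            rw [List.mem_map]
            exact ⟨w, by
              rw [List.mem_filter, PySem.List.mem_pyRange_one]
              exact ⟨hwb, by simpa [PySem.Int.mod_eq_zero_iff_dvd] using hwdvd⟩, hxw.symm⟩

-- ===== VERDICT (by name: the statement is the Claim_ definition above) =====
theorem rectangles_with_area_spec : Claim_equal_rectangles_with_area := by
  intro s counted _
  unfold Spec_rectangles_with_area
  exact pv_main s counted
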